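-- pv_equiv track=rewrite | github.com/Ttaiyaki/Final | CuteCat CuteFox.py | count
-- ===== SOURCE A (Python) =====
-- def count(dicted):
--     '''count'''
--     count_cat = 0
--     count_fox = 0
--     for i in dicted.values():
--         if "Cat" in i:
--             count_cat += 1
--         else:
--             count_fox += 1
--     return count_cat, count_fox
-- ===== SOURCE B (Python) =====
-- def count(dicted):
--     '''count'''
--     def go(vs, lo, hi):
--         if hi - lo == 0:
--             return (0, 0)
--         if hi - lo == 1:
--             return (1, 0) if "Cat" in vs[lo] else (0, 1)
--         mid = (lo + hi) // 2
--         c1, f1 = go(vs, lo, mid)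
--         c2, f2 = go(vs, mid, hi)
--         return (c1 + c2, f1 + f2)
--     vs = list(dicted.values())
--     return go(vs, 0, len(vs))
-- ===== Notes on version B (the rewrite author's own statement) =====
-- stated objective: alternative
-- what changed: B replaces the single-pass two-accumulator loop with a recursive divide-and-conquer over the list of values: each half-range is counted independently and the (cat, fox) pairs of the halves are summed.
import Mathlib
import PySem

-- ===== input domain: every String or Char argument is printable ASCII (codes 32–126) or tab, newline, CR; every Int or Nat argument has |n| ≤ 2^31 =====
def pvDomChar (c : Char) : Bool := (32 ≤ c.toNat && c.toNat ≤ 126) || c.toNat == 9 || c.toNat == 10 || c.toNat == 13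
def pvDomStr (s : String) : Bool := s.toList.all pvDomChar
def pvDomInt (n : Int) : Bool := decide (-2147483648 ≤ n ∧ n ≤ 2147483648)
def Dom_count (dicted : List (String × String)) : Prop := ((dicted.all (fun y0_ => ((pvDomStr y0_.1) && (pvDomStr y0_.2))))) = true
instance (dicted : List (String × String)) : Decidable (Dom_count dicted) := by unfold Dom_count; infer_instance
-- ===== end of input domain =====

-- B replaces A's single-pass two-accumulator loop by a recursive divide-and-conquer over the
-- list of values, summing the (cat, fox) pairs of the two half-ranges (alternative structure).

-- ===== PORT A =====
-- one loop over the dict's values, two accumulators, one incremented per branch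
def count (dicted : List (String × String)) : Int × Int :=
  (PySem.Dict.ofList dicted).values.foldl
    (fun (cc : Int × Int) i =>
      if PySem.Str.isIn "Cat" i then (cc.1 + 1, cc.2) else (cc.1, cc.2 + 1))
    (0, 0)

-- ===== PORT B =====
-- go vs lo hi: divide-and-conquer on the index range [lo, hi) of vs, as in Source B.
-- vs[lo] is ported via pyGet?/getD ""; every reachable call has lo < vs.length, where it is exact.
def countGo (vs : List String) (lo hi : Nat) : Int × Int :=
  if _h0 : hi - lo = 0 then (0, 0)
  else if _h1 : hi - lo = 1 then
    (if PySem.Str.isIn "Cat" ((PySem.List.pyGet? vs (lo : Int)).getD "") then ((1 : Int), (0 : Int))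
     else ((0 : Int), (1 : Int)))
  else
    let mid := (lo + hi) / 2   -- Python (lo+hi)//2 on these nonnegative ints = Nat division
    let r1 := countGo vs lo mid
    let r2 := countGo vs mid hi
    (r1.1 + r2.1, r1.2 + r2.2)
termination_by hi - lo
decreasing_by all_goals omega

def count_alt (dicted : List (String × String)) : Int × Int :=
  let vs := (PySem.Dict.ofList dicted).values
  countGo vs 0 vs.length

-- ===== PRECONDITION & SPEC =====
def Spec_count (dicted : List (String × String)) (out : Int × Int) : Prop := out = count_alt dicted
instance (dicted : List (String × String)) (out : Int × Int) : Decidable (Spec_count dicted out) := by unfold Spec_count; infer_instance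

-- ===== CLAIM (what is proved, stated in full; the proofs are below) =====
def Claim_equal_count : Prop := ∀ (dicted : List (String × String)), Dom_count dicted → Spec_count dicted (count dicted)

-- ===== LEMMAS AND PROOFS =====

-- A's fold computes (cat count, total - cat count) over any value list
theorem count_fold_eq (p : String → Bool) (l : List String) (a b : Int) :
    l.foldl (fun (cc : Int × Int) i => if p i then (cc.1 + 1, cc.2) else (cc.1, cc.2 + 1)) (a, b)
      = (a + ((l.filter p).length : Int), b + ((l.length : Int) - ((l.filter p).length : Int))) := by
  induction l generalizing a b with
  | nil => simp
  | cons x xs ih =>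
    simp only [List.foldl_cons, List.filter_cons, List.length_cons]
    by_cases h : p x = true
    · rw [if_pos h, ih]; simp [h]; ring
    · rw [if_neg h, ih]; simp [h]; ring

-- B's divide-and-conquer computes the same pair on the slice [lo, hi)
theorem countGo_eq (vs : List String) :
    ∀ (n lo hi : Nat), hi - lo = n → lo ≤ hi → hi ≤ vs.length →
      countGo vs lo hi
        = (((((vs.drop lo).take (hi - lo)).filter (fun v => PySem.Str.isIn "Cat" v)).length : Int),
           ((hi - lo : Nat) : Int)
             - ((((vs.drop lo).take (hi - lo)).filter (fun v => PySem.Str.isIn "Cat" v)).length : Int)) := by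
  intro n
  induction n using Nat.strong_induction_on with
  | _ n ih =>
    intro lo hi hn hle hlen
    rw [countGo]
    by_cases h0 : hi - lo = 0
    · simp [h0]
    · rw [dif_neg h0]
      by_cases h1 : hi - lo = 1
      · have hlt : lo < vs.length := by omega
        have hone : (vs.drop lo).take (hi - lo) = [vs[lo]] := by
          rw [h1, List.take_one, List.head?_drop, List.getElem?_eq_getElem hlt]
          rfl
        rw [dif_pos h1, hone, PySem.List.pyGet?_natCast, List.getElem?_eq_getElem hlt,
          Option.getD_some, h1]
        by_cases hp : PySem.Str.isIn "Cat" vs[lo] = true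
        · rw [if_pos hp]; simp at hp; simp [hp]
        · rw [if_neg hp]; simp at hp; simp [hp]
      · rw [dif_neg h1]
        dsimp only
        have hmid1 : lo < (lo + hi) / 2 := by omega
        have hmid2 : (lo + hi) / 2 < hi := by omega
        rw [ih ((lo + hi) / 2 - lo) (by omega) lo ((lo + hi) / 2) rfl (by omega) (by omega),
            ih (hi - (lo + hi) / 2) (by omega) ((lo + hi) / 2) hi rfl (by omega) hlen]
        have hsplit : (vs.drop lo).take (hi - lo)
            = (vs.drop lo).take ((lo + hi) / 2 - lo)
              ++ (vs.drop ((lo + hi) / 2)).take (hi - (lo + hi) / 2) := by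
          have h2 : (vs.drop lo).drop ((lo + hi) / 2 - lo) = vs.drop ((lo + hi) / 2) := by
            rw [List.drop_drop]; congr 1; omega
          rw [← h2, ← List.take_add]
          congr 1
          omega
        rw [hsplit, List.filter_append, List.length_append]
        simp only [Prod.mk.injEq]
        constructor
        · push_cast; ring
        · push_cast; omega

-- ===== VERDICT (by name: the statement is the Claim_ definition above) =====
theorem count_spec : Claim_equal_count := by
  intro dicted _
  show count dicted = count_alt dicted
  unfold count count_alt
  set vs := (PySem.Dict.ofList dicted).values with hvs
  rw [count_fold_eq, countGo_eq vs vs.length 0 vs.length rfl (Nat.zero_le _) le_rfl]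
  simp
  rfl
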